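-- pv_equiv track=rewrite | github.com/Minki-Trader/Project_Obsidian_Prime_v2 | foundation/pipelines/run_stage10_logreg_mt5_scout.py | _cell_after
-- ===== SOURCE A (Python) =====
-- from typing import Any, Mapping, Sequence
--
-- def _normalize_report_label(value: Any) -> str:
--     return str(value or "").strip().rstrip(":").casefold()
--
-- def _cell_after(row: Sequence[str], aliases: Sequence[str]) -> str | None:
--     normalized_aliases = {_normalize_report_label(alias) for alias in aliases}
--     for index, cell in enumerate(row[:-1]):
--         if _normalize_report_label(cell) in normalized_aliases:
--             for next_cell in row[index + 1 :]:
--                 if str(next_cell).strip():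
--                     return next_cell
--     return None
-- ===== SOURCE B (Python) =====
-- def _normalize_report_label(value) -> str:
--     return str(value or "").strip().rstrip(":").casefold()
--
--
-- def _cell_after(row, aliases):
--     normalized_aliases = {_normalize_report_label(alias) for alias in aliases}
--     last = len(row) - 1
--     armed = False
--     for index, cell in enumerate(row):
--         if armed and str(cell).strip():
--             return cell
--         if index < last and _normalize_report_label(cell) in normalized_aliases:
--             armed = True
--     return None
-- ===== Notes on version B (the rewrite author's own statement) =====
-- stated objective: simpler
-- what changed: Replaced the nested loop (outer label scan plus inner lookahead scan over the rest of the row) by a single linear pass with an 'armed' flag that returns the first non-blank cell after the earliest matching label.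
import Mathlib
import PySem

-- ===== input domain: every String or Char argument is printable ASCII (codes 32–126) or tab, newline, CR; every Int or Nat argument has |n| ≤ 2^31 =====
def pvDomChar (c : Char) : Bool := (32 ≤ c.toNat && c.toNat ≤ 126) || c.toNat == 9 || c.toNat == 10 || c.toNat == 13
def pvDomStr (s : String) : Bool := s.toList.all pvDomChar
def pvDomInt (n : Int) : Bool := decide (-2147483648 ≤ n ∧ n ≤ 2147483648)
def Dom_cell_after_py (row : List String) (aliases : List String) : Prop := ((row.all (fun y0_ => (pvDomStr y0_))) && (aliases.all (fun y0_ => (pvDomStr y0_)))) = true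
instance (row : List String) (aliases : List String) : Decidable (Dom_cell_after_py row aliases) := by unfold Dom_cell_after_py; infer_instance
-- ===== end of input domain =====

-- B replaces A's nested loop (label scan + inner lookahead) by one linear pass with an 'armed' flag; objective: simpler.


-- ===== PORT A =====
-- _normalize_report_label, shared by both Pythons; worked on .toList.
-- rstrip(":") ported by hand (drop trailing ':' chars) — exact; casefold = Chars.lower, exact on ASCII.
def normLabel (s : String) : List Char :=
  PySem.Chars.lower (((PySem.Chars.strip s.toList).reverse.dropWhile (fun c => c == ':')).reverse)

-- inner loop: 'for next_cell in row[index+1:]: if str(next_cell).strip(): return next_cell'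
def aInner : List String → Option String
  | [] => none
  | c :: rest => if PySem.Chars.strip c.toList ≠ [] then some c else aInner rest

-- outer loop over enumerate(row[:-1])
def aOuter (row : List String) (al : PySem.Set (List Char)) : List (Int × String) → Option String
  | [] => none
  | (i, cell) :: rest =>
    if PySem.Set.contains al (normLabel cell) then
      match aInner (PySem.List.slice row (some (i + 1)) none) with
      | some v => some v
      | none => aOuter row al rest
    else aOuter row al rest

def cell_after_py (row : List String) (aliases : List String) : Option String :=
  aOuter row (PySem.Set.ofList (aliases.map normLabel))
    (PySem.List.enumerate (PySem.List.slice row none (some (-1))) 0)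

-- ===== PORT B =====
-- single pass with an 'armed' flag over enumerate(row)
def bLoop (al : PySem.Set (List Char)) (last : Int) : List (Int × String) → Bool → Option String
  | [], _ => none
  | (i, cell) :: rest, armed =>
    if armed ∧ PySem.Chars.strip cell.toList ≠ [] then some cell
    else bLoop al last rest (armed || (decide (i < last) && PySem.Set.contains al (normLabel cell)))

def cell_after_py_alt (row : List String) (aliases : List String) : Option String :=
  bLoop (PySem.Set.ofList (aliases.map normLabel)) ((row.length : Int) - 1)
    (PySem.List.enumerate row 0) false

-- ===== PRECONDITION & SPEC =====
def Spec_cell_after_py (row : List String) (aliases : List String) (out : Option String) : Prop := out = cell_after_py_alt row aliases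
instance (row : List String) (aliases : List String) (out : Option String) : Decidable (Spec_cell_after_py row aliases out) := by unfold Spec_cell_after_py; infer_instance

-- ===== CLAIM (what is proved, stated in full; the proofs are below) =====
def Claim_equal_cell_after_py : Prop := ∀ (row : List String) (aliases : List String), Dom_cell_after_py row aliases → Spec_cell_after_py row aliases (cell_after_py row aliases)

-- ===== LEMMAS AND PROOFS =====

-- structural form of A's outer loop: scan the suffix, on a non-last matching label take aInner of the tail, else keep scanning
def gFn (al : PySem.Set (List Char)) : List String → Option String
  | [] => none
  | c :: rest =>
    if rest ≠ [] ∧ PySem.Set.contains al (normLabel c) then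
      match aInner rest with
      | some v => some v
      | none => gFn al rest
    else gFn al rest

-- structural form of B's loop
def hFn (al : PySem.Set (List Char)) : Bool → List String → Option String
  | _, [] => none
  | armed, c :: rest =>
    if armed ∧ PySem.Chars.strip c.toList ≠ [] then some c
    else hFn al (armed || (decide (rest ≠ []) && PySem.Set.contains al (normLabel c))) rest

lemma aOuter_eq_gFn (row : List String) (al : PySem.Set (List Char)) :
    ∀ (s : List String) (k : Nat), row.drop k = s →
      aOuter row al (PySem.List.enumerate s.dropLast (k : Int)) = gFn al s := by
  intro s
  induction s with
  | nil => intro k h; simp [aOuter, gFn]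
  | cons c rest ih =>
    intro k h
    cases rest with
    | nil => simp [aOuter, gFn]
    | cons c2 t =>
      have hdrop : row.drop (k + 1) = c2 :: t := by
        have h2 : (row.drop k).tail = c2 :: t := by rw [h]; rfl
        rwa [List.tail_drop] at h2
      have hslice : PySem.List.slice row (some ((k : Int) + 1)) none = c2 :: t := by
        have : ((k : Int) + 1) = ((k + 1 : Nat) : Int) := by push_cast; ring
        rw [this, PySem.List.slice_from_natCast, hdrop]
      have ih' := ih (k + 1) hdrop
      have hcast : (k : Int) + 1 = ((k + 1 : Nat) : Int) := by push_cast; ring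
      rw [List.dropLast_cons₂, PySem.List.enumerate_cons, aOuter, hslice, hcast, ih']
      conv_rhs => rw [gFn]
      simp only [ne_eq, reduceCtorEq, not_false_eq_true, true_and]

lemma bLoop_eq_hFn (row : List String) (al : PySem.Set (List Char)) :
    ∀ (s : List String) (k : Nat) (armed : Bool), row.drop k = s →
      bLoop al ((row.length : Int) - 1) (PySem.List.enumerate s (k : Int)) armed = hFn al armed s := by
  intro s
  induction s with
  | nil => intro k armed h; simp [PySem.List.enumerate, bLoop, hFn]
  | cons c rest ih =>
    intro k armed h
    have hk : k ≤ row.length := by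
      by_contra hgt
      have : row.drop k = [] := List.drop_eq_nil_of_le (by omega)
      rw [h] at this; exact absurd this (by simp)
    have hlen : row.length - k = rest.length + 1 := by
      have := congrArg List.length h
      simpa [List.length_drop] using this
    have hdrop : row.drop (k + 1) = rest := by
      have h2 : (row.drop k).tail = rest := by rw [h]; rfl
      rwa [List.tail_drop] at h2
    have hdec : decide ((k : Int) < (row.length : Int) - 1) = decide (rest ≠ []) := by
      rw [decide_eq_decide, ← List.length_pos_iff]
      omega
    have ih' := ih (k + 1) (armed || (decide (rest ≠ []) && PySem.Set.contains al (normLabel c))) hdrop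
    have hcast : (k : Int) + 1 = ((k + 1 : Nat) : Int) := by push_cast; ring
    rw [PySem.List.enumerate_cons, bLoop, hdec, hcast, ih']
    conv_rhs => rw [hFn]

lemma gFn_eq_none_of_aInner (al : PySem.Set (List Char)) :
    ∀ s : List String, aInner s = none → gFn al s = none := by
  intro s
  induction s with
  | nil => intro _; rfl
  | cons c rest ih =>
    intro h
    by_cases hc : PySem.Chars.strip c.toList ≠ []
    · rw [aInner, if_pos hc] at h; cases h
    · rw [aInner, if_neg hc] at h
      have hg := ih h
      rw [gFn]
      split
      · rw [h]; exact hg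
      · exact hg

lemma hFn_true_eq_aInner (al : PySem.Set (List Char)) :
    ∀ s : List String, hFn al true s = aInner s := by
  intro s
  induction s with
  | nil => rfl
  | cons c rest ih => simp only [hFn, aInner, true_and, Bool.true_or, ih]

lemma gFn_eq_hFn_false (al : PySem.Set (List Char)) :
    ∀ s : List String, gFn al s = hFn al false s := by
  intro s
  induction s with
  | nil => rfl
  | cons c rest ih =>
    conv_rhs => rw [hFn]
    rw [if_neg (by simp), Bool.false_or]
    conv_lhs => rw [gFn]
    by_cases hc : rest ≠ [] ∧ PySem.Set.contains al (normLabel c) = true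
    · have hb : (decide (rest ≠ []) && PySem.Set.contains al (normLabel c)) = true := by
        rw [Bool.and_eq_true]; exact ⟨decide_eq_true hc.1, hc.2⟩
      rw [if_pos hc, hb, hFn_true_eq_aInner]
      cases hi : aInner rest with
      | none => exact gFn_eq_none_of_aInner al rest hi
      | some v => rfl
    · have hcontains : PySem.Set.contains al (normLabel c) = false ∨ rest = [] := by
        rcases not_and_or.mp hc with h1 | h2
        · exact Or.inr (not_not.mp h1)
        · left
          cases hcb : PySem.Set.contains al (normLabel c)
          · rfl
          · exact absurd hcb h2
      have hb : (decide (rest ≠ []) && PySem.Set.contains al (normLabel c)) = false := by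
        rcases hcontains with h | h
        · rw [h, Bool.and_false]
        · rw [h]; rfl
      rw [if_neg hc, hb, ih]

-- ===== VERDICT (by name: the statement is the Claim_ definition above) =====
theorem cell_after_py_spec : Claim_equal_cell_after_py := by
  intro row aliases _
  unfold Spec_cell_after_py cell_after_py cell_after_py_alt
  rw [PySem.List.slice_to_neg_one]
  have hA := aOuter_eq_gFn row (PySem.Set.ofList (aliases.map normLabel)) row 0 (by simp)
  have hB := bLoop_eq_hFn row (PySem.Set.ofList (aliases.map normLabel)) row 0 false (by simp)
  simp only [Nat.cast_zero] at hA hB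
  rw [hA, hB, gFn_eq_hFn_false]
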